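-- pv_equiv track=rewrite | github.com/19CSE314-Software-Engineering/Unit-testing | utils.py | count_crises_by_type
-- ===== SOURCE A (Python) =====
-- def count_crises_by_type(crisis_data: list) -> dict:
--     """
--     Count crises by type for the overview section.
--
--     Args:
--         crisis_data: List of crisis data
--
--     Returns:
--         Dictionary with counts for each crisis type
--     """
--     crisis_counts = {"Fire": 0, "Flood": 0, "Earthquake": 0, "Power Outage": 0, "Other": 0}
--     for crisis in crisis_data:
--         crisis_type = crisis["crisis_type"]
--         if crisis_type in crisis_counts:
--             crisis_counts[crisis_type] += 1
--         else:
--             crisis_counts["Other"] += 1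
--     return crisis_counts
-- ===== SOURCE B (Python) =====
-- def count_crises_by_type(crisis_data: list) -> dict:
--     # One pass: histogram of raw crisis_type values; then assemble the five
--     # fixed buckets, with Other = everything not in the four named buckets.
--     hist = {}
--     for crisis in crisis_data:
--         t = crisis["crisis_type"]
--         hist[t] = hist.get(t, 0) + 1
--     n = len(crisis_data)
--     f = hist.get("Fire", 0)
--     fl = hist.get("Flood", 0)
--     e = hist.get("Earthquake", 0)
--     p = hist.get("Power Outage", 0)
--     return {
--         "Fire": f,
--         "Flood": fl,
--         "Earthquake": e,
--         "Power Outage": p,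
--         "Other": n - f - fl - e - p,
--     }
-- ===== Notes on version B (the rewrite author's own statement) =====
-- stated objective: idiomatic
-- what changed: B builds a plain histogram of the raw crisis_type values in one pass and then assembles the five fixed buckets directly, computing Other as the remainder (total minus the four named counts) instead of A's per-record membership test and in-place bucket increments.
import Mathlib
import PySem

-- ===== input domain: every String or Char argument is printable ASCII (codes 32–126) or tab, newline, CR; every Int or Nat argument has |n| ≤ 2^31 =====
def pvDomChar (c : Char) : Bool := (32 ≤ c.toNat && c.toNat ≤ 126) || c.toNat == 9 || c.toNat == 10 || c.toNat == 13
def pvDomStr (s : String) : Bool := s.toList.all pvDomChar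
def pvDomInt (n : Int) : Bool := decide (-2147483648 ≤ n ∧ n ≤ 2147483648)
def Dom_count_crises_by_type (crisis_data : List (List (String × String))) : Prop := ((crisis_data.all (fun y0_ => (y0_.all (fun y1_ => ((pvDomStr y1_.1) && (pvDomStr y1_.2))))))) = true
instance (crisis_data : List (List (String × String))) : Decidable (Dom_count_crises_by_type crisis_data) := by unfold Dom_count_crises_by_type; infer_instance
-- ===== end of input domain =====

-- B replaces A's in-dict membership/increment loop by a raw histogram plus a
-- closed-form assembly of the five fixed buckets (Other = total minus the four
-- named counts); idiomatic, same O(n) cost.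


-- ===== PORT A =====
def count_crises_by_type (crisis_data : List (List (String × String))) : List (String × Int) :=
  (crisis_data.foldl
    (fun counts crisis =>
      let crisis_type := (PySem.Dict.mk crisis).getD "crisis_type" ""
      if counts.contains crisis_type then
        counts.modify crisis_type 0 (· + 1)
      else
        counts.modify "Other" 0 (· + 1))
    (PySem.Dict.mk [("Fire", 0), ("Flood", 0), ("Earthquake", 0), ("Power Outage", 0), ("Other", 0)])).items

-- ===== PORT B =====
def count_crises_by_type_alt (crisis_data : List (List (String × String))) : List (String × Int) :=
  let hist := crisis_data.foldl
    (fun h crisis =>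
      let t := (PySem.Dict.mk crisis).getD "crisis_type" ""
      h.insert t (h.getD t 0 + 1))
    PySem.Dict.empty
  let n : Int := crisis_data.length
  let f := hist.getD "Fire" 0
  let fl := hist.getD "Flood" 0
  let e := hist.getD "Earthquake" 0
  let p := hist.getD "Power Outage" 0
  [("Fire", f), ("Flood", fl), ("Earthquake", e), ("Power Outage", p),
   ("Other", n - f - fl - e - p)]

-- ===== PRECONDITION & SPEC =====
-- Pre_ excludes exactly the inputs where a record lacks the key "crisis_type",
-- on which the Python A (and B) raises KeyError.
def Pre_count_crises_by_type (crisis_data : List (List (String × String))) : Prop :=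
  ∀ crisis ∈ crisis_data, (PySem.Dict.mk crisis).contains "crisis_type" = true
instance (crisis_data : List (List (String × String))) : Decidable (Pre_count_crises_by_type crisis_data) := by unfold Pre_count_crises_by_type; infer_instance
def pvWitness_count_crises_by_type : (List (List (String × String))) :=
  [[("crisis_type", "Fire")], [("crisis_type", "weird")]]

def Spec_count_crises_by_type (crisis_data : List (List (String × String))) (out : List (String × Int)) : Prop := out = count_crises_by_type_alt crisis_data
instance (crisis_data : List (List (String × String))) (out : List (String × Int)) : Decidable (Spec_count_crises_by_type crisis_data out) := by unfold Spec_count_crises_by_type; infer_instance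

-- ===== CLAIM (what is proved, stated in full; the proofs are below) =====
def Claim_equal_count_crises_by_type : Prop := ∀ (crisis_data : List (List (String × String))), Dom_count_crises_by_type crisis_data → Pre_count_crises_by_type crisis_data → Spec_count_crises_by_type crisis_data (count_crises_by_type crisis_data)

-- ===== LEMMAS AND PROOFS =====

-- the list of crisis_type values
def pvCts (crisis_data : List (List (String × String))) : List String :=
  crisis_data.map (fun crisis => (PySem.Dict.mk crisis).getD "crisis_type" "")

-- whether a value lands in one of the four named buckets
def pvNamed (t : String) : Bool :=
  t == "Fire" || t == "Flood" || t == "Earthquake" || t == "Power Outage"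

-- one step of A's loop on the fixed five-key dict
theorem pvStep (a b c d e : Int) (t : String) :
    (if (PySem.Dict.mk [("Fire", a), ("Flood", b), ("Earthquake", c), ("Power Outage", d), ("Other", e)]).contains t
      then (PySem.Dict.mk [("Fire", a), ("Flood", b), ("Earthquake", c), ("Power Outage", d), ("Other", e)]).modify t 0 (· + 1)
      else (PySem.Dict.mk [("Fire", a), ("Flood", b), ("Earthquake", c), ("Power Outage", d), ("Other", e)]).modify "Other" 0 (· + 1)) =
    PySem.Dict.mk [("Fire", a + if t = "Fire" then 1 else 0), ("Flood", b + if t = "Flood" then 1 else 0),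
      ("Earthquake", c + if t = "Earthquake" then 1 else 0), ("Power Outage", d + if t = "Power Outage" then 1 else 0),
      ("Other", e + if pvNamed t then 0 else 1)] := by
  by_cases hf : t = "Fire" <;> by_cases hl : t = "Flood" <;> by_cases he : t = "Earthquake" <;>
    by_cases hp : t = "Power Outage" <;> by_cases ho : t = "Other" <;>
    simp_all [pvNamed, PySem.Dict.contains, PySem.Dict.modify, PySem.Dict.insert,
      PySem.Dict.getD, PySem.Dict.get?] <;>
    try (intro h; rcases h with h | h | h | h | h <;> simp_all)

-- A's loop over the fixed five-key dict, characterised by per-type counts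
theorem pvA_loop (l : List String) (a b c d e : Int) :
    l.foldl
      (fun counts t =>
        if counts.contains t then counts.modify t 0 (· + 1)
        else counts.modify "Other" 0 (· + 1))
      (PySem.Dict.mk [("Fire", a), ("Flood", b), ("Earthquake", c), ("Power Outage", d), ("Other", e)]) =
    PySem.Dict.mk [("Fire", a + l.count "Fire"), ("Flood", b + l.count "Flood"),
      ("Earthquake", c + l.count "Earthquake"), ("Power Outage", d + l.count "Power Outage"),
      ("Other", e + (l.countP (fun t => !pvNamed t)))] := by
  induction l generalizing a b c d e with
  | nil => simp
  | cons t l ih =>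
    rw [List.foldl_cons, pvStep, ih]
    by_cases hf : t = "Fire" <;> by_cases hl : t = "Flood" <;> by_cases he : t = "Earthquake" <;>
      by_cases hp : t = "Power Outage" <;>
      simp_all [pvNamed] <;> omega

-- the unnamed records are exactly the total minus the four named counts
theorem pvOther_count (l : List String) :
    (l.countP (fun t => !pvNamed t) : Int) =
      (l.length : Int) - l.count "Fire" - l.count "Flood" - l.count "Earthquake" - l.count "Power Outage" := by
  induction l with
  | nil => simp
  | cons t l ih =>
    simp only [List.countP_cons, List.count_cons, List.length_cons, pvNamed] at *
    by_cases hf : t = "Fire" <;> by_cases hl : t = "Flood" <;>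
      by_cases he : t = "Earthquake" <;> by_cases hp : t = "Power Outage" <;>
      simp_all <;> omega

-- both ports as folds over the extracted crisis_type list
theorem pvA_eq (crisis_data : List (List (String × String))) :
    count_crises_by_type crisis_data =
    ((pvCts crisis_data).foldl
      (fun counts t =>
        if counts.contains t then counts.modify t 0 (· + 1)
        else counts.modify "Other" 0 (· + 1))
      (PySem.Dict.mk [("Fire", 0), ("Flood", 0), ("Earthquake", 0), ("Power Outage", 0), ("Other", 0)])).items := by
  simp [count_crises_by_type, pvCts, List.foldl_map]

theorem pvB_eq (crisis_data : List (List (String × String))) :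
    count_crises_by_type_alt crisis_data =
    (let hist := (pvCts crisis_data).foldl (fun h t => h.insert t (h.getD t 0 + 1)) PySem.Dict.empty
     let n : Int := crisis_data.length
     [("Fire", hist.getD "Fire" 0), ("Flood", hist.getD "Flood" 0),
      ("Earthquake", hist.getD "Earthquake" 0), ("Power Outage", hist.getD "Power Outage" 0),
      ("Other", n - hist.getD "Fire" 0 - hist.getD "Flood" 0 - hist.getD "Earthquake" 0 - hist.getD "Power Outage" 0)]) := by
  simp [count_crises_by_type_alt, pvCts, List.foldl_map]

-- ===== VERDICT (by name: the statement is the Claim_ definition above) =====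
theorem count_crises_by_type_spec : Claim_equal_count_crises_by_type := by
  intro crisis_data _ _
  show count_crises_by_type crisis_data = count_crises_by_type_alt crisis_data
  rw [pvA_eq, pvB_eq, pvA_loop]
  simp only [PySem.Dict.getD_foldl_insert_add_one, PySem.Dict.getD_empty]
  have h := pvOther_count (pvCts crisis_data)
  have hlen : (pvCts crisis_data).length = crisis_data.length := by simp [pvCts]
  simp [← hlen]
  omega
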